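-- pv_equiv track=rewrite | github.com/mynhardtburger/foobar.withgoogle | en_route_solute.py | solution
-- ===== SOURCE A (Python) =====
-- def solution(s):
--     right_direction_counter = 0
--     salutes = 0
--
--     for i in range(len(s)):
--         if s[i] == '-':
--             pass
--         elif s[i] == '>':
--             right_direction_counter += 1
--         elif s[i] == '<':
--             salutes += right_direction_counter
--
--     salutes *= 2
--
--     return salutes
-- ===== SOURCE B (Python) =====
-- def solution(s):
--     pair_count = 0
--     for i in range(len(s)):
--         if s[i] == '>':
--             for j in range(i + 1, len(s)):
--                 if s[j] == '<':
--                     pair_count += 1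
--     return 2 * pair_count
-- ===== Notes on version B (the rewrite author's own statement) =====
-- stated objective: alternative
-- what changed: Replaced the single-pass running right-counter with an explicit nested double loop that counts each ('>' before '<') crossing pair directly and returns twice the pair count.
import Mathlib
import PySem

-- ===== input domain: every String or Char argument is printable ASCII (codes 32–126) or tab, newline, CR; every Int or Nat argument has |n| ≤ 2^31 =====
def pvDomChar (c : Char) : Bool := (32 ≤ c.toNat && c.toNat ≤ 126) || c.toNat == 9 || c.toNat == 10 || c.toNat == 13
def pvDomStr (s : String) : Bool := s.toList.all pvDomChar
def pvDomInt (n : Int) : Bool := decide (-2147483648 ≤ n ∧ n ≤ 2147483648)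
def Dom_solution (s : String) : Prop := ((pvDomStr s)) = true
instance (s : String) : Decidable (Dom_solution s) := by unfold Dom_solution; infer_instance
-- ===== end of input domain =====

-- B replaces A's single-pass running right-counter with a nested double loop counting each '>'…'<' crossing pair directly (alternative decomposition, same result).

-- ===== PORT A =====
-- A: one pass, state (right_direction_counter, salutes); finally salutes *= 2.
def solution (s : String) : Int :=
  let st := s.toList.foldl
    (fun (p : Int × Int) c =>
      if c = '-' then p
      else if c = '>' then (p.1 + 1, p.2)
      else if c = '<' then (p.1, p.2 + p.1)
      else p)
    (0, 0)
  st.2 * 2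

-- ===== PORT B =====
-- inner loop of B: count '<' among the characters after position i
def solLtCount (l : List Char) : Int :=
  l.foldl (fun n c => if c = '<' then n + 1 else n) 0

-- outer loop of B: for each '>' add the number of later '<'
def solPairs : List Char → Int
  | [] => 0
  | c :: rest => (if c = '>' then solLtCount rest else 0) + solPairs rest

def solution_alt (s : String) : Int := 2 * solPairs s.toList

-- ===== PRECONDITION & SPEC =====
def Spec_solution (s : String) (out : Int) : Prop := out = solution_alt s
instance (s : String) (out : Int) : Decidable (Spec_solution s out) := by unfold Spec_solution; infer_instance

-- ===== CLAIM (what is proved, stated in full; the proofs are below) =====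
def Claim_equal_solution : Prop := ∀ (s : String), Dom_solution s → Spec_solution s (solution s)

-- ===== LEMMAS AND PROOFS =====

theorem solLtCount_shift (l : List Char) (n : Int) :
    l.foldl (fun n c => if c = '<' then n + 1 else n) n = n + solLtCount l := by
  induction l generalizing n with
  | nil => simp [solLtCount]
  | cons c rest ih =>
    simp only [solLtCount, List.foldl_cons]
    rw [ih, ih (if c = '<' then (0:Int) + 1 else 0)]
    split <;> ring

theorem solLtCount_cons (c : Char) (l : List Char) :
    solLtCount (c :: l) = (if c = '<' then 1 else 0) + solLtCount l := by
  conv_lhs => rw [solLtCount, List.foldl_cons, solLtCount_shift]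
  split <;> ring

-- invariant of A's fold: starting from (rc, sal) it ends with
-- second component sal + rc * (#'<' in l) + pairs(l)
theorem solFold_inv (l : List Char) (rc sal : Int) :
    (l.foldl
      (fun (p : Int × Int) c =>
        if c = '-' then p
        else if c = '>' then (p.1 + 1, p.2)
        else if c = '<' then (p.1, p.2 + p.1)
        else p)
      (rc, sal)).2 = sal + rc * solLtCount l + solPairs l := by
  induction l generalizing rc sal with
  | nil => simp [solLtCount, solPairs]
  | cons c rest ih =>
    simp only [List.foldl_cons, solPairs, solLtCount_cons]
    by_cases h1 : c = '-'
    · simp [h1, ih]; try ring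
    · by_cases h2 : c = '>'
      · simp [h1, h2, ih]; try ring
      · by_cases h3 : c = '<'
        · simp [h1, h2, h3, ih]; try ring
        · simp [h1, h2, h3, ih]; try ring

-- ===== VERDICT (by name: the statement is the Claim_ definition above) =====
theorem solution_spec : Claim_equal_solution := by
  intro s _
  show solution s = solution_alt s
  simp only [solution, solution_alt]
  rw [solFold_inv]
  ring
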